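-- pv_equiv track=rewrite | github.com/StefanoRapisarda/WellBegun | src/wellbegun/routers/journal.py | _match_label_to_index
-- ===== SOURCE A (Python) =====
-- def _match_label_to_index(label: str, titles: list[str]) -> int | None:
--     """Case-insensitive exact match, then substring containment fallback."""
--     label_lower = label.lower().strip()
--     # Exact match first
--     for idx, title in enumerate(titles):
--         if title.lower().strip() == label_lower:
--             return idx
--     # Substring containment fallback
--     for idx, title in enumerate(titles):
--         if label_lower in title.lower().strip() or title.lower().strip() in label_lower:
--             return idx
--     return None
-- ===== SOURCE B (Python) =====
-- def _match_label_to_index(label: str, titles: list[str]) -> int | None: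
--     """Single pass: exact match returns immediately; first substring match is
--     remembered and returned only if no exact match exists."""
--     label_lower = label.lower().strip()
--     first_sub = None
--     for idx, title in enumerate(titles):
--         t = title.lower().strip()
--         if t == label_lower:
--             return idx
--         if first_sub is None and (label_lower in t or t in label_lower):
--             first_sub = idx
--     return first_sub
-- ===== Notes on version B (the rewrite author's own statement) =====
-- stated objective: alternative
-- what changed: Replaces A's two sequential scans (exact pass, then substring pass, each re-normalizing every title) with a single pass that normalizes each title once, returns immediately on exact match and carries the first substring hit in an accumulator.
import Mathlib
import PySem

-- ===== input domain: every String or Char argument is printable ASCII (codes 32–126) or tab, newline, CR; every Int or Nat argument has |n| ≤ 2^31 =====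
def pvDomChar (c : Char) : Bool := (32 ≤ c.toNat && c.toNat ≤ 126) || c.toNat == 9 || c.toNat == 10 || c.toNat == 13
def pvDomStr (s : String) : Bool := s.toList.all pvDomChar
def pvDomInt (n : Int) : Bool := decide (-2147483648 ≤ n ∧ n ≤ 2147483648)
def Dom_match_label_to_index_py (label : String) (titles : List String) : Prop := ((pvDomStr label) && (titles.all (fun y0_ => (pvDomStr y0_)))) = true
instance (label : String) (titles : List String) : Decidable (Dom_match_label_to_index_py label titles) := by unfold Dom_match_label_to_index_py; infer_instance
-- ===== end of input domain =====

-- B fuses A's two scans (exact pass then substring pass) into one pass that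
-- normalizes each title once and carries the first substring hit in an accumulator.


-- ===== PORT A =====
-- title.lower().strip()
def pvNorm (s : String) : String := PySem.Str.strip (PySem.Str.lower s)

-- label_lower in t or t in label_lower
def pvSubCond (ll t : String) : Bool := PySem.Str.isIn ll t || PySem.Str.isIn t ll

-- A's first loop: exact match
def pvLoopExact (ll : String) : List String → Int → Option Int
  | [], _ => none
  | t :: rest, i => if pvNorm t == ll then some i else pvLoopExact ll rest (i + 1)

-- A's second loop: substring fallback
def pvLoopSub (ll : String) : List String → Int → Option Int
  | [], _ => none
  | t :: rest, i => if pvSubCond ll (pvNorm t) then some i else pvLoopSub ll rest (i + 1)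

def match_label_to_index_py (label : String) (titles : List String) : Option Int :=
  let ll := pvNorm label
  match pvLoopExact ll titles 0 with
  | some i => some i
  | none => pvLoopSub ll titles 0

-- ===== PORT B =====
-- single pass with a first-substring accumulator
def pvLoopB (ll : String) : List String → Int → Option Int → Option Int
  | [], _, firstSub => firstSub
  | title :: rest, i, firstSub =>
    let t := pvNorm title
    if t == ll then some i
    else if firstSub.isNone && pvSubCond ll t then pvLoopB ll rest (i + 1) (some i)
    else pvLoopB ll rest (i + 1) firstSub

def match_label_to_index_py_alt (label : String) (titles : List String) : Option Int :=
  pvLoopB (pvNorm label) titles 0 none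

-- ===== PRECONDITION & SPEC =====
def Spec_match_label_to_index_py (label : String) (titles : List String) (out : Option Int) : Prop := out = match_label_to_index_py_alt label titles
instance (label : String) (titles : List String) (out : Option Int) : Decidable (Spec_match_label_to_index_py label titles out) := by unfold Spec_match_label_to_index_py; infer_instance

-- ===== CLAIM (what is proved, stated in full; the proofs are below) =====
def Claim_equal_match_label_to_index_py : Prop := ∀ (label : String) (titles : List String), Dom_match_label_to_index_py label titles → Spec_match_label_to_index_py label titles (match_label_to_index_py label titles)

-- ===== LEMMAS AND PROOFS =====
-- Loop invariant: B's fused loop equals A's exact loop, falling back to the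
-- accumulator if set, else to A's substring loop.
theorem pvLoopB_eq (ll : String) (ts : List String) (i : Int) (fs : Option Int) :
    pvLoopB ll ts i fs =
      match pvLoopExact ll ts i with
      | some j => some j
      | none => match fs with
        | some j => some j
        | none => pvLoopSub ll ts i := by
  induction ts generalizing i fs with
  | nil => cases fs <;> simp [pvLoopB, pvLoopExact, pvLoopSub]
  | cons t rest ih =>
    simp only [pvLoopB, pvLoopExact, pvLoopSub]
    by_cases hx : (pvNorm t == ll) = true
    · simp [hx]
    · simp only [hx, if_false, Bool.false_eq_true]
      cases fs with
      | some j => simp [ih]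
      | none =>
        by_cases hs : pvSubCond ll (pvNorm t) = true
        · simp [hs, ih]
        · simp [hs, ih]

-- ===== VERDICT (by name: the statement is the Claim_ definition above) =====
theorem match_label_to_index_py_spec : Claim_equal_match_label_to_index_py := by
  intro label titles _
  unfold Spec_match_label_to_index_py match_label_to_index_py match_label_to_index_py_alt
  rw [pvLoopB_eq]
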